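-- pv_equiv track=rewrite | github.com/reza-mirjahanian/Markdown-Parser | 1 - Markdown Cleaner/parser.py | remove_indented_code_blocks
-- ===== SOURCE A (Python) =====
-- def remove_indented_code_blocks(text: str) -> tuple[str, list[str]]:
--     """
--     Remove indented code blocks (4 spaces or 1 tab) from markdown.
--
--     An indented code block is a consecutive group of lines each indented
--     by at least 4 spaces or 1 tab, preceded and followed by a blank line
--     (or start/end of document).
--
--     Returns:
--         Tuple of (cleaned_text, list_of_removed_blocks)
--     """
--     lines = text.split('\n')
--     removed: list[str] = []
--     result_lines: list[str] = []
--     buffer: list[str] = []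
--     in_code = False
--
--     for line in lines:
--         is_code_line = line.startswith('    ') or line.startswith('\t')
--         is_blank = line.strip() == ''
--
--         if in_code:
--             if is_code_line or is_blank:
--                 buffer.append(line)
--             else:
--                 # End of indented block
--                 # Strip trailing blank lines from buffer
--                 while buffer and buffer[-1].strip() == '':
--                     result_lines.append(buffer.pop())
--                 if buffer:
--                     removed.append('\n'.join(buffer))
--                 buffer = []
--                 in_code = False
--                 result_lines.append(line)
--         else:
--             if is_code_line and (not result_lines or result_lines[-1].strip() == ''):
--                 in_code = True
--                 buffer.append(line)
--             else:
--                 result_lines.append(line)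
--
--     # Handle remaining buffer
--     if buffer:
--         while buffer and buffer[-1].strip() == '':
--             result_lines.append(buffer.pop())
--         if buffer:
--             removed.append('\n'.join(buffer))
--
--     return '\n'.join(result_lines), removed
-- ===== SOURCE B (Python) =====
-- def remove_indented_code_blocks(text: str) -> tuple[str, list[str]]:
--     """Remove indented code blocks; index-based scan with an inner block collector."""
--     lines = text.split('\n')
--     removed: list[str] = []
--     result_lines: list[str] = []
--     i = 0
--     n = len(lines)
--     while i < n:
--         line = lines[i]
--         if (line.startswith('    ') or line.startswith('\t')) and \
--            (not result_lines or result_lines[-1].strip() == ''):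
--             # collect the whole indented-or-blank run starting here
--             j = i
--             block: list[str] = []
--             while j < n and (lines[j].startswith('    ') or lines[j].startswith('\t')
--                              or lines[j].strip() == ''):
--                 block.append(lines[j])
--                 j += 1
--             # peel trailing blank lines back into the output
--             while block and block[-1].strip() == '':
--                 result_lines.append(block.pop())
--             if block:
--                 removed.append('\n'.join(block))
--             i = j
--         else:
--             result_lines.append(line)
--             i += 1
--     return '\n'.join(result_lines), removed
-- ===== Notes on version B (the rewrite author's own statement) =====
-- stated objective: alternative
-- what changed: Replaced A's single pass driven by a persistent in_code flag and carried buffer with an index-based outer scan that, on spotting a block start, runs an inner loop consuming the whole indented-or-blank run at once, then peels trailing blanks and emits the block.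
import Mathlib
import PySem

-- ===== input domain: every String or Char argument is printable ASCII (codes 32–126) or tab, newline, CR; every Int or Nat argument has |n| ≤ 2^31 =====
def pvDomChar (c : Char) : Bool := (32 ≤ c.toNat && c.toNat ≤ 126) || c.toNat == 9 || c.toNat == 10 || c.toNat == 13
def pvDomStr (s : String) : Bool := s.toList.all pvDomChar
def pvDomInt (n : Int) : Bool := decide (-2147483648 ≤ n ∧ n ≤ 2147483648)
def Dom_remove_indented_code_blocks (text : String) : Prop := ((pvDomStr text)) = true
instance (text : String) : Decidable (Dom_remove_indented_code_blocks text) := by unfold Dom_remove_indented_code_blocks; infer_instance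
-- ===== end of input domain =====

-- B replaces A's persistent in_code flag state machine by an index scan with an
-- inner loop that collects each indented run in one go (objective: alternative decomposition).

-- ===== PORT A =====
-- shared line predicates (identical expressions in both Pythons)
def ricbIsCode (l : String) : Bool := PySem.Str.startswith l "    " || PySem.Str.startswith l "\t"
def ricbIsBlank (l : String) : Bool := PySem.Str.strip l == ""
-- 'not result_lines or result_lines[-1].strip() == ""'
def ricbLastBlank (res : List String) : Bool :=
  match res.getLast? with
  | none => true
  | some t => ricbIsBlank t
-- the 'while buffer and buffer[-1].strip()==..: result_lines.append(buffer.pop())' loop,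
-- run on the REVERSED buffer (pop from the end = head of the reverse);
-- returns (remaining reversed buffer, grown result_lines)
def ricbPop : List String → List String → List String × List String
  | [], res => ([], res)
  | b :: bs, res => if ricbIsBlank b then ricbPop bs (res ++ [b]) else (b :: bs, res)
-- the end-of-loop 'if buffer: …' flush of A
def ricbFlush (removed res buffer : List String) : List String × List String :=
  if buffer.isEmpty then (res, removed)
  else
    let q := ricbPop buffer.reverse res
    (q.2, if q.1.isEmpty then removed else removed ++ [PySem.Str.join "\n" q.1.reverse])
-- one iteration of A's for-loop; state = (removed, result_lines, buffer, in_code)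
def ricbStep (st : List String × List String × List String × Bool) (line : String) :
    List String × List String × List String × Bool :=
  match st with
  | (removed, res, buffer, in_code) =>
    if in_code then
      if ricbIsCode line || ricbIsBlank line then (removed, res, buffer ++ [line], true)
      else
        let q := ricbPop buffer.reverse res
        let removed' := if q.1.isEmpty then removed else removed ++ [PySem.Str.join "\n" q.1.reverse]
        (removed', q.2 ++ [line], [], false)
    else
      if ricbIsCode line && ricbLastBlank res then (removed, res, buffer ++ [line], true)
      else (removed, res ++ [line], [], false)

def remove_indented_code_blocks (text : String) : String × List String :=
  let lines := (PySem.Str.split? text "\n").getD []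
  let s := List.foldl ricbStep ([], [], [], false) lines
  let fr := ricbFlush s.1 s.2.1 s.2.2.1
  (PySem.Str.join "\n" fr.1, fr.2)

-- ===== PORT B =====
-- inner while-loop of B: collect the maximal indented-or-blank run, return (block, rest)
def ricbCollect : List String → List String × List String
  | [] => ([], [])
  | l :: ls =>
    if ricbIsCode l || ricbIsBlank l then
      let p := ricbCollect ls
      (l :: p.1, p.2)
    else ([], l :: ls)

theorem ricbCollect_length : ∀ ls : List String, (ricbCollect ls).2.length ≤ ls.length := by
  intro ls
  induction ls with
  | nil => simp [ricbCollect]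
  | cons l ls ih =>
    simp only [ricbCollect]
    split
    · simpa using Nat.le_succ_of_le ih
    · simp

-- outer while-loop of B over the remaining lines (the index i becomes the suffix)
def ricbGo : List String → List String → List String → List String × List String
  | [], res, rem => (res, rem)
  | l :: ls, res, rem =>
    if ricbIsCode l && ricbLastBlank res then
      let p := ricbCollect (l :: ls)
      let q := ricbPop p.1.reverse res
      let rem' := if q.1.isEmpty then rem else rem ++ [PySem.Str.join "\n" q.1.reverse]
      ricbGo p.2 q.2 rem'
    else ricbGo ls (res ++ [l]) rem
  termination_by lines _ _ => lines.length
  decreasing_by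
  · have hc : (ricbIsCode l || ricbIsBlank l) = true := by
      rename_i h
      simp only [Bool.and_eq_true] at h
      simp [h.1]
    simp only [ricbCollect, hc, if_true]
    exact Nat.lt_succ_of_le (ricbCollect_length ls)
  · simp

def remove_indented_code_blocks_alt (text : String) : String × List String :=
  let lines := (PySem.Str.split? text "\n").getD []
  let p := ricbGo lines [] []
  (PySem.Str.join "\n" p.1, p.2)

-- ===== PRECONDITION & SPEC =====
def Spec_remove_indented_code_blocks (text : String) (out : String × List String) : Prop := out = remove_indented_code_blocks_alt text
instance (text : String) (out : String × List String) : Decidable (Spec_remove_indented_code_blocks text out) := by unfold Spec_remove_indented_code_blocks; infer_instance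

-- ===== CLAIM (what is proved, stated in full; the proofs are below) =====
def Claim_equal_remove_indented_code_blocks : Prop := ∀ (text : String), Dom_remove_indented_code_blocks text → Spec_remove_indented_code_blocks text (remove_indented_code_blocks text)

-- ===== LEMMAS AND PROOFS =====

-- the first uncollected line is neither indented nor blank
theorem ricbCollect_stop : ∀ (ls : List String) (t : String) (ts : List String),
    (ricbCollect ls).2 = t :: ts → (ricbIsCode t || ricbIsBlank t) = false := by
  intro ls
  induction ls with
  | nil => intro t ts h; simp [ricbCollect] at h
  | cons l ls ih =>
    intro t ts h
    by_cases hc : (ricbIsCode l || ricbIsBlank l) = true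
    · simp only [ricbCollect, hc, if_true] at h
      exact ih t ts h
    · simp only [ricbCollect, if_neg hc] at h
      obtain ⟨rfl, rfl⟩ := h
      simpa using hc

-- A's foldl while in_code, characterised through ricbCollect
theorem ricb_incode (lines : List String) : ∀ (rem res buffer : List String),
    List.foldl ricbStep (rem, res, buffer, true) lines =
      (match (ricbCollect lines).2 with
       | [] => (rem, res, buffer ++ (ricbCollect lines).1, true)
       | t :: ts =>
         let q := ricbPop (buffer ++ (ricbCollect lines).1).reverse res
         let rem' := if q.1.isEmpty then rem else rem ++ [PySem.Str.join "\n" q.1.reverse]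
         List.foldl ricbStep (rem', q.2 ++ [t], [], false) ts) := by
  induction lines with
  | nil => intro rem res buffer; simp [ricbCollect]
  | cons l ls ih =>
    intro rem res buffer
    by_cases hc : (ricbIsCode l || ricbIsBlank l) = true
    · simp only [List.foldl_cons, ricbStep, hc, if_true, ricbCollect]
      rw [ih rem res (buffer ++ [l])]
      simp [List.append_assoc]
    · have hcf : (ricbIsCode l || ricbIsBlank l) = false := by simpa using hc
      simp only [List.foldl_cons, ricbStep, hcf, Bool.false_eq_true, if_false]
      simp only [ricbCollect, hcf, Bool.false_eq_true, if_false]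
      simp

theorem ricb_main : ∀ (n : Nat) (lines res rem : List String), lines.length ≤ n →
    (ricbFlush (List.foldl ricbStep (rem, res, [], false) lines).1
      (List.foldl ricbStep (rem, res, [], false) lines).2.1
      (List.foldl ricbStep (rem, res, [], false) lines).2.2.1) = ricbGo lines res rem := by
  intro n
  induction n with
  | zero =>
    intro lines res rem h
    have : lines = [] := List.eq_nil_of_length_eq_zero (Nat.le_zero.mp h)
    subst this
    simp [ricbGo, ricbFlush]
  | succ n ih =>
    intro lines res rem h
    cases lines with
    | nil => simp [ricbGo, ricbFlush]
    | cons l ls =>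
      by_cases hs : (ricbIsCode l && ricbLastBlank res) = true
      · have hc : (ricbIsCode l || ricbIsBlank l) = true := by
          simp only [Bool.and_eq_true] at hs; simp [hs.1]
        simp only [List.foldl_cons, ricbStep, hs, if_true, Bool.false_eq_true, if_false,
          List.nil_append]
        rw [ricb_incode ls rem res [l]]
        rw [ricbGo]
        simp only [hs, if_true]
        have hcol : ricbCollect (l :: ls) = (l :: (ricbCollect ls).1, (ricbCollect ls).2) := by
          simp [ricbCollect, hc]
        cases hrest : (ricbCollect ls).2 with
        | nil =>
          simp only [hrest, hcol]
          rw [ricbGo]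
          simp [ricbFlush]
        | cons t ts =>
          simp only [hrest, hcol]
          have hts : ts.length ≤ n := by
            have h1 := ricbCollect_length ls
            rw [hrest] at h1
            simp only [List.length_cons] at h1 h
            omega
          rw [ih ts _ _ hts]
          -- on the B side, t is neither indented nor blank, so ricbGo just appends it
          have hstop := ricbCollect_stop ls t ts hrest
          have htc : ricbIsCode t = false := by
            simp only [Bool.or_eq_false_iff] at hstop; exact hstop.1
          conv_rhs => rw [ricbGo]
          simp [htc]
      · simp only [List.foldl_cons, ricbStep, hs]
        rw [ricbGo]
        simp only [hs]
        simp only [Bool.false_eq_true, if_false]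
        exact ih ls (res ++ [l]) rem (by simpa using Nat.lt_succ_iff.mp (by simpa using h))

-- ===== VERDICT (by name: the statement is the Claim_ definition above) =====
theorem remove_indented_code_blocks_spec : Claim_equal_remove_indented_code_blocks := by
  intro text _
  unfold Spec_remove_indented_code_blocks remove_indented_code_blocks remove_indented_code_blocks_alt
  have := ricb_main ((PySem.Str.split? text "\n").getD []).length
    ((PySem.Str.split? text "\n").getD []) [] [] (le_refl _)
  simp only [this]
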